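-- pv_equiv track=rewrite | github.com/officialmustafaahmedkhan/sql | server/app.py | split_queries
-- ===== SOURCE A (Python) =====
-- def split_queries(sql):
--     queries = []
--     current = []
--     in_string = False
--     string_char = None
--
--     for char in sql:
--         if char in ("'", '"') and (not in_string or string_char == char):
--             if not in_string:
--                 string_char = char
--             in_string = not in_string
--         elif char == ';' and not in_string:
--             query = ''.join(current).strip()
--             if query:
--                 queries.append(query)
--             current = []
--             continue
--         current.append(char)
--
--     query = ''.join(current).strip()
--     if query:
--         queries.append(query)
--
--     return queries
-- ===== SOURCE B (Python) =====
-- def split_queries(sql):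
--     queries = []
--     parts = []
--     i = 0
--     n = len(sql)
--     while i < n:
--         ch = sql[i]
--         if ch in ("'", '"'):
--             j = sql.find(ch, i + 1)
--             if j == -1:
--                 # unterminated literal: it swallows the rest of the input
--                 parts.append(sql[i:])
--                 i = n
--             else:
--                 parts.append(sql[i:j + 1])
--                 i = j + 1
--         elif ch == ';':
--             q = "".join(parts).strip()
--             if q:
--                 queries.append(q)
--             parts = []
--             i += 1
--         else:
--             parts.append(ch)
--             i += 1
--     q = "".join(parts).strip()
--     if q:
--         queries.append(q)
--     return queries
-- ===== Notes on version B (the rewrite author's own statement) =====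
-- stated objective: alternative
-- what changed: Replaces A's char-by-char in_string/string_char boolean state machine by a scan that, on seeing a quote, searches for the matching quote and consumes the whole string literal in one step, so no in-string flag is carried between iterations (chunks are gathered and joined per segment).
import Mathlib
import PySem

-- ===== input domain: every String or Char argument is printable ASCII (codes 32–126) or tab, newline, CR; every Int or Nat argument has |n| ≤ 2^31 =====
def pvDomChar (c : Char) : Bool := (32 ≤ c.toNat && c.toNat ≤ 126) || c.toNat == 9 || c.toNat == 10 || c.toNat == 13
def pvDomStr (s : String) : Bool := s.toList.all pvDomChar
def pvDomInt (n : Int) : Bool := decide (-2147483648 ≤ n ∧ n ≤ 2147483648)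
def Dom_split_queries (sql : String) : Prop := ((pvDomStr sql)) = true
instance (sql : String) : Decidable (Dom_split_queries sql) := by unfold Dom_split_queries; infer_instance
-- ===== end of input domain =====

-- B replaces A's char-by-char in_string/string_char state machine by an index-free scan that
-- consumes each whole quoted literal in one inner search step (objective: alternative decomposition).

-- ===== PORT A =====
-- one step of A's for-loop; state = (queries, current, in_string, string_char)
def pvStepA (st : List String × List Char × Bool × Option Char) (char : Char) :
    List String × List Char × Bool × Option Char :=
  match st with
  | (queries, current, in_string, string_char) =>
    if (char = '\'' ∨ char = '"') ∧ (in_string = false ∨ string_char = some char) then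
      let string_char := if in_string = false then some char else string_char
      (queries, current ++ [char], !in_string, string_char)
    else if char = ';' ∧ in_string = false then
      let query := PySem.Chars.strip current
      ((if query = [] then queries else queries ++ [String.mk query]), [], in_string, string_char)
    else
      (queries, current ++ [char], in_string, string_char)

def split_queries (sql : String) : List String :=
  match sql.toList.foldl pvStepA ([], [], false, none) with
  | (queries, current, _, _) =>
    let query := PySem.Chars.strip current
    if query = [] then queries else queries ++ [String.mk query]

-- ===== PORT B =====
-- B's while-loop: remaining input, current segment, queries so far
def pvAltGo : List Char → List Char → List String → List String
  | [], current, queries =>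
      let q := PySem.Chars.strip current
      if q = [] then queries else queries ++ [String.mk q]
  | ch :: rest, current, queries =>
      if ch = '\'' ∨ ch = '"' then
        match rest.idxOf? ch with
        | none => pvAltGo [] (current ++ ch :: rest) queries   -- unterminated literal swallows the rest
        | some j => pvAltGo (rest.drop (j + 1)) (current ++ ch :: rest.take (j + 1)) queries
      else if ch = ';' then
        let q := PySem.Chars.strip current
        pvAltGo rest [] (if q = [] then queries else queries ++ [String.mk q])
      else pvAltGo rest (current ++ [ch]) queries
  termination_by l _ _ => l.length
  decreasing_by all_goals simp [List.length_drop]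

def split_queries_alt (sql : String) : List String := pvAltGo sql.toList [] []

-- ===== PRECONDITION & SPEC =====
def Spec_split_queries (sql : String) (out : List String) : Prop := out = split_queries_alt sql
instance (sql : String) (out : List String) : Decidable (Spec_split_queries sql out) := by unfold Spec_split_queries; infer_instance

-- ===== CLAIM (what is proved, stated in full; the proofs are below) =====
def Claim_equal_split_queries : Prop := ∀ (sql : String), Dom_split_queries sql → Spec_split_queries sql (split_queries sql)

-- ===== LEMMAS AND PROOFS =====

-- A's final flush, applied to a fold state
def pvFinishA (st : List String × List Char × Bool × Option Char) : List String :=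
  let query := PySem.Chars.strip st.2.1
  if query = [] then st.1 else st.1 ++ [String.mk query]

-- inside a string literal opened with quote c, A appends every char up to and including the
-- matching quote (or the whole rest if none), then is back outside a string
lemma pvLoopA_instring (xs : List Char) (c : Char) (hc : c = '\'' ∨ c = '"') :
    ∀ (q : List String) (cur : List Char),
    xs.foldl pvStepA (q, cur, true, some c) =
      match xs.idxOf? c with
      | none => (q, cur ++ xs, true, some c)
      | some j => (xs.drop (j + 1)).foldl pvStepA (q, cur ++ xs.take (j + 1), false, some c) := by
  induction xs with
  | nil => intro q cur; simp
  | cons d rest ih =>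
    intro q cur
    by_cases hdc : d = c
    · subst hdc
      have hstep : pvStepA (q, cur, true, some d) d = (q, cur ++ [d], false, some d) := by
        simp [pvStepA, hc]
      rw [List.foldl_cons, hstep, List.idxOf?_cons]
      simp
    · have hstep : pvStepA (q, cur, true, some c) d = (q, cur ++ [d], true, some c) := by
        simp [pvStepA, Ne.symm hdc]
      rw [List.foldl_cons, hstep, ih, List.idxOf?_cons]
      have : (d == c) = false := by simp [hdc]
      rw [this]
      cases h : rest.idxOf? c with
      | none => simp
      | some j => simp

lemma pvLoopA_eq : ∀ (xs cur : List Char) (q : List String) (sc : Option Char),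
    pvFinishA (xs.foldl pvStepA (q, cur, false, sc)) = pvAltGo xs cur q := by
  intro xs cur q
  induction xs, cur, q using pvAltGo.induct with
  | case1 cur q h => intro sc; simp [pvFinishA, pvAltGo]
  | case2 cur q h => intro sc; simp [pvFinishA, pvAltGo]
  | case3 ch rest cur q hq hnone ih =>
    intro sc
    have hstep : pvStepA (q, cur, false, sc) ch = (q, cur ++ [ch], true, some ch) := by
      simp [pvStepA, hq]
    rw [List.foldl_cons, hstep, pvLoopA_instring rest ch hq, hnone]
    conv_rhs => rw [pvAltGo]
    simp [pvAltGo, pvFinishA, hq, hnone]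
  | case4 ch rest cur q hq j hsome ih =>
    intro sc
    have hstep : pvStepA (q, cur, false, sc) ch = (q, cur ++ [ch], true, some ch) := by
      simp [pvStepA, hq]
    rw [List.foldl_cons, hstep, pvLoopA_instring rest ch hq, hsome]
    simp only []
    rw [show cur ++ [ch] ++ List.take (j + 1) rest = cur ++ ch :: List.take (j + 1) rest by simp]
    rw [ih (some ch)]
    conv_rhs => rw [pvAltGo]
    simp [hq, hsome]
  | case5 rest cur qs qv hneg ih =>
    intro sc
    have hstep : pvStepA (qs, cur, false, sc) ';' =
        ((if PySem.Chars.strip cur = [] then qs else qs ++ [String.mk (PySem.Chars.strip cur)]),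
          [], false, sc) := by
      simp [pvStepA]
    rw [List.foldl_cons, hstep]
    conv_rhs => rw [pvAltGo]
    rw [if_neg hneg, if_pos rfl]
    exact ih sc
  | case6 ch rest cur q hq hsemi ih =>
    intro sc
    have hstep : pvStepA (q, cur, false, sc) ch = (q, cur ++ [ch], false, sc) := by
      simp [pvStepA, hq, hsemi]
    rw [List.foldl_cons, hstep]
    conv_rhs => rw [pvAltGo]
    rw [if_neg hq, if_neg hsemi]
    exact ih sc

-- ===== VERDICT (by name: the statement is the Claim_ definition above) =====
theorem split_queries_spec : Claim_equal_split_queries := by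
  intro sql _
  unfold Spec_split_queries split_queries split_queries_alt
  rw [← pvLoopA_eq sql.toList [] [] none]
  cases h : sql.toList.foldl pvStepA ([], [], false, none) with
  | mk a b => simp [pvFinishA]
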